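-- pv_equiv track=rewrite | github.com/Ashiq-am/Path-of-Python | 3.Data Types/Arrays Set 1 and Set 2/Prefix Sum/Counting common prefix or suffix strings in two lists/Counting common prefix or suffix strings in two lists.py | prefixSuffixString
-- ===== SOURCE A (Python) =====
-- def prefixSuffixString(s1, s2):
-- 	count = 0
-- 	for s in s2:
-- 		for t in s1:
-- 			if t.startswith(s) or t.endswith(s):
-- 				count += 1
-- 				break
-- 	return count
-- ===== SOURCE B (Python) =====
-- def prefixSuffixString(s1, s2):
--     affixes = set()
--     for t in s1:
--         for i in range(len(t) + 1):
--             affixes.add(t[:i])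
--             affixes.add(t[i:])
--     count = 0
--     for s in s2:
--         if s in affixes:
--             count += 1
--     return count
-- ===== Notes on version B (the rewrite author's own statement) =====
-- stated objective: faster
-- what changed: Instead of scanning s1 with startswith/endswith for every s in s2, B precomputes once the set of all prefixes and suffixes of the s1 strings and answers each s2 query by a single set membership test.
import Mathlib
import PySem

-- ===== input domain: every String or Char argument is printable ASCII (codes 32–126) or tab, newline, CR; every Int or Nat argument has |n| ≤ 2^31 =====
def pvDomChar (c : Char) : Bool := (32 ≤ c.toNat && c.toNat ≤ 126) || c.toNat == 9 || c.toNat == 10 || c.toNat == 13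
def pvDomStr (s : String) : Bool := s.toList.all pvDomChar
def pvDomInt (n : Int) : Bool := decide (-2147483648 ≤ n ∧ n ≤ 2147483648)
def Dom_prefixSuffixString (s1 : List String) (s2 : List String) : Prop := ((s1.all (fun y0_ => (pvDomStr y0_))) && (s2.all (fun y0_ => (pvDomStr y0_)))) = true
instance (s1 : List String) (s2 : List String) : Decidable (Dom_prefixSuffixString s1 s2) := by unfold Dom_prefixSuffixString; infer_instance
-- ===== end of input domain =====

-- B replaces A's per-query scan of s1 (startswith/endswith for every pair) by one precomputed
-- set of all prefixes and suffixes of the s1 strings, queried by membership (objective: faster).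

-- ===== PORT A =====
-- inner 'for t in s1: … break' of A: returns true as soon as some t matches (the break)
def pvInnerA (s1 : List String) (s : String) : Bool :=
  match s1 with
  | [] => false
  | t :: ts =>
      if PySem.Str.startswith t s || PySem.Str.endswith t s then true
      else pvInnerA ts s

def prefixSuffixString (s1 : List String) (s2 : List String) : Int :=
  s2.foldl (fun count s => if pvInnerA s1 s then count + 1 else count) 0

-- ===== PORT B =====
-- 'for i in range(len(t)+1): affixes.add(t[:i]); affixes.add(t[i:])'
def pvAddAffixes (acc : PySem.Set String) (t : String) : PySem.Set String :=
  (PySem.List.pyRange 0 ((PySem.Str.len t : Int) + 1) 1).foldl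
    (fun a i =>
      PySem.Set.add (PySem.Set.add a (PySem.Str.slice t none (some i)))
        (PySem.Str.slice t (some i) none)) acc

def prefixSuffixString_alt (s1 : List String) (s2 : List String) : Int :=
  let affixes := s1.foldl pvAddAffixes PySem.Set.empty
  s2.foldl (fun count s => if PySem.Set.contains affixes s then count + 1 else count) 0

-- ===== PRECONDITION & SPEC =====
def Spec_prefixSuffixString (s1 : List String) (s2 : List String) (out : Int) : Prop := out = prefixSuffixString_alt s1 s2
instance (s1 : List String) (s2 : List String) (out : Int) : Decidable (Spec_prefixSuffixString s1 s2 out) := by unfold Spec_prefixSuffixString; infer_instance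

-- ===== CLAIM (what is proved, stated in full; the proofs are below) =====
def Claim_equal_prefixSuffixString : Prop := ∀ (s1 : List String) (s2 : List String), Dom_prefixSuffixString s1 s2 → Spec_prefixSuffixString s1 s2 (prefixSuffixString s1 s2)

-- ===== LEMMAS AND PROOFS =====

-- A's inner loop is an existence test over s1
theorem pvInnerA_cons (t : String) (ts : List String) (s : String) :
    pvInnerA (t :: ts) s
      = ((PySem.Str.startswith t s || PySem.Str.endswith t s) || pvInnerA ts s) := by
  cases hb : (PySem.Str.startswith t s || PySem.Str.endswith t s)
  · simp only [pvInnerA, hb, Bool.false_eq_true, if_false, Bool.false_or]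
  · simp only [pvInnerA, hb, if_true, Bool.true_or]

theorem pvInnerA_iff (s1 : List String) (s : String) :
    pvInnerA s1 s = true ↔
      ∃ t ∈ s1, (PySem.Str.startswith t s || PySem.Str.endswith t s) = true := by
  induction s1 with
  | nil => simp [pvInnerA]
  | cons t ts ih =>
      rw [pvInnerA_cons]
      simp only [Bool.or_eq_true, ih, List.mem_cons]
      constructor
      · rintro (h | ⟨u, hu, h⟩)
        · exact ⟨t, Or.inl rfl, h⟩
        · exact ⟨u, Or.inr hu, h⟩
      · rintro ⟨u, (rfl | hu), h⟩
        · exact Or.inl h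
        · exact Or.inr ⟨u, hu, h⟩

-- membership in the set B builds for one string t: exactly the prefixes and suffixes of t
theorem mem_pvAddAffixes (acc : PySem.Set String) (t s : String) :
    s ∈ pvAddAffixes acc t ↔
      s ∈ acc ∨ (PySem.Str.startswith t s || PySem.Str.endswith t s) = true := by
  unfold pvAddAffixes
  have key : ∀ (is : List Int) (a : PySem.Set String),
      s ∈ is.foldl (fun a i =>
          PySem.Set.add (PySem.Set.add a (PySem.Str.slice t none (some i)))
            (PySem.Str.slice t (some i) none)) a ↔
        s ∈ a ∨ ∃ i ∈ is,
          s = PySem.Str.slice t none (some i) ∨ s = PySem.Str.slice t (some i) none := by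
    intro is
    induction is with
    | nil => simp
    | cons i is ih =>
        intro a
        rw [List.foldl_cons, ih]
        simp only [PySem.Set.mem_add, List.mem_cons]
        constructor
        · rintro (((h | h) | h) | ⟨j, hj, h⟩)
          · exact Or.inl h
          · exact Or.inr ⟨i, Or.inl rfl, Or.inl h⟩
          · exact Or.inr ⟨i, Or.inl rfl, Or.inr h⟩
          · exact Or.inr ⟨j, Or.inr hj, h⟩
        · rintro (h | ⟨j, (rfl | hj), h⟩)
          · exact Or.inl (Or.inl (Or.inl h))
          · rcases h with h | h
            · exact Or.inl (Or.inl (Or.inr h))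
            · exact Or.inl (Or.inr h)
          · exact Or.inr ⟨j, hj, h⟩
  rw [key]
  rw [Bool.or_eq_true]
  constructor
  · rintro (h | ⟨i, hi, h | h⟩)
    · exact Or.inl h
    · refine Or.inr (Or.inl ?_)
      have hmem := (PySem.List.mem_pyRange_one).mp hi
      have hs : s.toList = t.toList.take i.toNat := by
        have h2 := congrArg String.toList h
        rw [PySem.Str.slice] at h2
        simpa [PySem.List.slice_to t.toList hmem.1] using h2
      have hp : s.toList <+: t.toList := by
        rw [hs]; exact List.take_prefix _ _
      exact (PySem.Chars.startswith_iff t.toList s.toList).mpr hp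
    · refine Or.inr (Or.inr ?_)
      have hmem := (PySem.List.mem_pyRange_one).mp hi
      have hs : s.toList = t.toList.drop i.toNat := by
        have h2 := congrArg String.toList h
        rw [PySem.Str.slice] at h2
        simpa [PySem.List.slice_from t.toList hmem.1] using h2
      have hp : s.toList <:+ t.toList := by
        rw [hs]; exact List.drop_suffix _ _
      exact (PySem.Chars.endswith_iff t.toList s.toList).mpr hp
  · rintro (h | h | h)
    · exact Or.inl h
    · -- prefix: i = |s|
      have hpre : s.toList <+: t.toList := (PySem.Chars.startswith_iff t.toList s.toList).mp h
      have hlen : s.toList.length ≤ t.toList.length := hpre.length_le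
      refine Or.inr ⟨(s.toList.length : Int), ?_, Or.inl ?_⟩
      · rw [PySem.List.mem_pyRange_one]
        refine ⟨by positivity, ?_⟩
        have hT : t.toList.length = t.length := String.length_toList
        simp only [PySem.Str.len_eq]
        omega
      · apply String.toList_inj.mp
        have h2 := List.prefix_iff_eq_take.mp hpre
        rw [PySem.Str.slice]
        simpa [PySem.List.slice_to t.toList (by positivity : (0:Int) ≤ (s.toList.length : Int))]
          using h2
    · -- suffix: i = |t| - |s|
      have hsuf : s.toList <:+ t.toList := (PySem.Chars.endswith_iff t.toList s.toList).mp h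
      have hlen : s.toList.length ≤ t.toList.length := hsuf.length_le
      refine Or.inr ⟨((t.toList.length - s.toList.length : Nat) : Int), ?_, Or.inr ?_⟩
      · rw [PySem.List.mem_pyRange_one]
        refine ⟨by positivity, ?_⟩
        have hT : t.toList.length = t.length := String.length_toList
        simp only [PySem.Str.len_eq]
        omega
      · apply String.toList_inj.mp
        have h2 := List.suffix_iff_eq_drop.mp hsuf
        rw [PySem.Str.slice]
        simpa [PySem.List.slice_from t.toList
            (by positivity : (0:Int) ≤ ((t.toList.length - s.toList.length : Nat) : Int))]
          using h2

-- membership in the full affix set over s1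
theorem mem_affixes (s1 : List String) (s : String) :
    s ∈ s1.foldl pvAddAffixes PySem.Set.empty ↔
      ∃ t ∈ s1, (PySem.Str.startswith t s || PySem.Str.endswith t s) = true := by
  have key : ∀ (l : List String) (acc : PySem.Set String),
      s ∈ l.foldl pvAddAffixes acc ↔
        s ∈ acc ∨ ∃ t ∈ l, (PySem.Str.startswith t s || PySem.Str.endswith t s) = true := by
    intro l
    induction l with
    | nil => simp
    | cons t ts ih =>
        intro acc
        rw [List.foldl_cons, ih, mem_pvAddAffixes]
        simp only [List.mem_cons]
        constructor
        · rintro ((h | h) | ⟨u, hu, h⟩)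
          · exact Or.inl h
          · exact Or.inr ⟨t, Or.inl rfl, h⟩
          · exact Or.inr ⟨u, Or.inr hu, h⟩
        · rintro (h | ⟨u, (rfl | hu), h⟩)
          · exact Or.inl (Or.inl h)
          · exact Or.inl (Or.inr h)
          · exact Or.inr ⟨u, hu, h⟩
  rw [key]
  simp [PySem.Set.empty]

theorem contains_eq_pvInnerA (s1 : List String) (s : String) :
    PySem.Set.contains (s1.foldl pvAddAffixes PySem.Set.empty) s = pvInnerA s1 s := by
  by_cases h : pvInnerA s1 s = true
  · rw [h]
    exact (PySem.Set.contains_iff _ _).mpr ((mem_affixes s1 s).mpr ((pvInnerA_iff s1 s).mp h))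
  · have h' : pvInnerA s1 s = false := by simpa using h
    rw [h']
    by_contra hc
    have hc' : PySem.Set.contains (s1.foldl pvAddAffixes PySem.Set.empty) s = true := by
      simpa using hc
    exact h ((pvInnerA_iff s1 s).mpr ((mem_affixes s1 s).mp ((PySem.Set.contains_iff _ _).mp hc')))

-- ===== VERDICT (by name: the statement is the Claim_ definition above) =====
theorem prefixSuffixString_spec : Claim_equal_prefixSuffixString := by
  intro s1 s2 _
  unfold Spec_prefixSuffixString prefixSuffixString prefixSuffixString_alt
  have hf : (fun (count : Int) (s : String) => if pvInnerA s1 s then count + 1 else count)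
      = (fun (count : Int) (s : String) =>
          if PySem.Set.contains (s1.foldl pvAddAffixes PySem.Set.empty) s then count + 1 else count) := by
    funext count s
    rw [contains_eq_pvInnerA]
  rw [hf]
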